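-- pv_equiv track=rewrite | github.com/Chlo-Sko/aoc-2015 | days/day5.py | no_danger_combos
-- ===== SOURCE A (Python) =====
-- def no_danger_combos(string):
--     danger_combos = ['ab','cd','pq','xy']
--     prev_char = string[0]
--     for char in string:
--         combo = prev_char + char
--         if combo in danger_combos:
--             return False
--         prev_char = char
--     return True
-- ===== SOURCE B (Python) =====
-- def no_danger_combos(string):
--     return not any(d in string for d in ('ab', 'cd', 'pq', 'xy'))
-- ===== Notes on version B (the rewrite author's own statement) =====
-- stated objective: idiomatic
-- what changed: B replaces A's character-by-character adjacent-pair scan (with a carried prev_char) by a membership test of each of the four forbidden two-character patterns as a substring of the whole string.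
import Mathlib
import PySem

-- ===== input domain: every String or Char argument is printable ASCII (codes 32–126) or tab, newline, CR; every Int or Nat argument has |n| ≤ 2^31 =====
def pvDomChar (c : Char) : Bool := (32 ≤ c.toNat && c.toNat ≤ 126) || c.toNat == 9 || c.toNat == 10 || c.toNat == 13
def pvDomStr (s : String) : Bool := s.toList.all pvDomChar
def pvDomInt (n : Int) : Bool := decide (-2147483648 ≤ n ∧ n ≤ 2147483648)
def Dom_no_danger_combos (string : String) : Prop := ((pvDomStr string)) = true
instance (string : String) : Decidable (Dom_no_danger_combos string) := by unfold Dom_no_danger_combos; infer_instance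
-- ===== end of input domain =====

-- B replaces A's adjacent-pair scan by a substring test of each forbidden pattern (idiomatic; same cost).
-- ===== PORT A =====
-- danger_combos = ['ab','cd','pq','xy'] (as lists of code points)
def dangerCombos : List (List Char) := [['a','b'], ['c','d'], ['p','q'], ['x','y']]

-- 'for char in string: combo = prev_char + char; if combo in danger_combos: return False; prev_char = char'
def noDangerLoop : Char → List Char → Bool
  | _, [] => true
  | prev, c :: rest => if [prev, c] ∈ dangerCombos then false else noDangerLoop c rest

def no_danger_combos (string : String) : Bool :=
  match PySem.Str.pyGet? string 0 with   -- string[0]; none = IndexError, excluded by Pre_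
  | none => true
  | some prev => noDangerLoop prev string.toList

-- ===== PORT B =====
def no_danger_combos_alt (string : String) : Bool :=
  !(["ab", "cd", "pq", "xy"].any (fun d => PySem.Str.isIn d string))

-- ===== PRECONDITION & SPEC =====
-- Pre_ excludes exactly the empty string, on which A raises IndexError at string[0].
def Pre_no_danger_combos (string : String) : Prop := string ≠ ""
instance (string : String) : Decidable (Pre_no_danger_combos string) := by unfold Pre_no_danger_combos; infer_instance
def pvWitness_no_danger_combos : String := "abc"

def Spec_no_danger_combos (string : String) (out : Bool) : Prop := out = no_danger_combos_alt string
instance (string : String) (out : Bool) : Decidable (Spec_no_danger_combos string out) := by unfold Spec_no_danger_combos; infer_instance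

-- ===== CLAIM (what is proved, stated in full; the proofs are below) =====
def Claim_equal_no_danger_combos : Prop := ∀ (string : String), Dom_no_danger_combos string → Pre_no_danger_combos string → Spec_no_danger_combos string (no_danger_combos string)

-- ===== LEMMAS AND PROOFS =====

-- a length-2 pattern is never a substring of a singleton
lemma isIn_pair_singleton (x y a : Char) : PySem.Chars.isIn [x, y] [a] = false := by
  rw [PySem.Chars.isIn_eq_false_iff]
  intro h
  have := h.length_le
  simp at this

-- peeling one character off the haystack for a length-2 pattern
lemma isIn_pair_cons (x y a b : Char) (t : List Char) :
    PySem.Chars.isIn [x, y] (a :: b :: t)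
      = ((decide (x = a) && decide (y = b)) || PySem.Chars.isIn [x, y] (b :: t)) := by
  rw [Bool.eq_iff_iff, PySem.Chars.isIn_iff_infix, Bool.or_eq_true, Bool.and_eq_true,
    PySem.Chars.isIn_iff_infix, List.infix_cons_iff]
  constructor
  · rintro (hp | hi)
    · rcases (List.cons_prefix_cons.mp hp) with ⟨hx, hp'⟩
      rcases (List.cons_prefix_cons.mp hp') with ⟨hy, _⟩
      exact Or.inl ⟨by simp [hx], by simp [hy]⟩
    · exact Or.inr hi
  · rintro (⟨hx, hy⟩ | hi)
    · simp only [decide_eq_true_eq] at hx hy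
      subst hx; subst hy
      exact Or.inl ⟨t, rfl⟩
    · exact Or.inr hi

-- the pair scan starting from prev equals the four substring tests on prev :: l
lemma noDangerLoop_eq (l : List Char) : ∀ prev,
    noDangerLoop prev l = !(dangerCombos.any (fun d => PySem.Chars.isIn d (prev :: l))) := by
  induction l with
  | nil =>
      intro prev
      simp [noDangerLoop, dangerCombos, isIn_pair_singleton]
  | cons c t ih =>
      intro prev
      by_cases hm : [prev, c] ∈ dangerCombos
      · have : dangerCombos.any (fun d => PySem.Chars.isIn d (prev :: c :: t)) = true := by
          refine List.any_eq_true.mpr ⟨[prev, c], hm, ?_⟩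
          rw [PySem.Chars.isIn_iff_infix]
          exact List.infix_cons_iff.mpr (Or.inl (by simp))
        simp [noDangerLoop, hm, this]
      · have hpc : ∀ x y : Char, [x, y] ∈ dangerCombos →
            (decide (x = prev) && decide (y = c)) = false := by
          intro x y hd
          by_cases hx : x = prev
          · by_cases hy : y = c
            · exact absurd (hx ▸ hy ▸ hd) hm
            · simp [hy]
          · simp [hx]
        simp only [noDangerLoop, hm, if_false, ih c]
        congr 1
        simp only [dangerCombos, List.any_cons, List.any_nil, isIn_pair_cons]
        rw [hpc 'a' 'b' (by simp [dangerCombos]), hpc 'c' 'd' (by simp [dangerCombos]),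
          hpc 'p' 'q' (by simp [dangerCombos]), hpc 'x' 'y' (by simp [dangerCombos])]
        simp

-- the duplicated-first-character pair [h,h] never matches (all patterns have distinct chars)
lemma isIn_dup_head (h : Char) (t : List Char) (x y : Char) (hxy : x ≠ y) :
    PySem.Chars.isIn [x, y] (h :: h :: t) = PySem.Chars.isIn [x, y] (h :: t) := by
  rw [isIn_pair_cons]
  by_cases hx : x = h
  · by_cases hy : y = h
    · exact absurd (hx.trans hy.symm) hxy
    · simp [hy]
  · simp [hx]

theorem no_danger_combos_eq_alt (s : String) (hs : s ≠ "") :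
    no_danger_combos s = no_danger_combos_alt s := by
  have hne : s.toList ≠ [] := by
    intro h
    apply hs
    exact String.toList_eq_nil_iff.mp h
  obtain ⟨h, t, hl⟩ := List.exists_cons_of_ne_nil hne
  unfold no_danger_combos no_danger_combos_alt
  simp only [PySem.Str.pyGet?_eq, PySem.Chars.pyGet?_eq_listPyGet?, hl]
  simp only [PySem.List.pyGet?, PySem.List.pyIdx?]
  norm_num
  rw [noDangerLoop_eq]
  simp only [hl, dangerCombos, List.any_cons, List.any_nil]
  rw [show "ab".toList = ['a','b'] from rfl, show "cd".toList = ['c','d'] from rfl,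
    show "pq".toList = ['p','q'] from rfl, show "xy".toList = ['x','y'] from rfl]
  rw [isIn_dup_head h t 'a' 'b' (by decide), isIn_dup_head h t 'c' 'd' (by decide),
    isIn_dup_head h t 'p' 'q' (by decide), isIn_dup_head h t 'x' 'y' (by decide)]
  simp [Bool.not_or]

-- ===== VERDICT (by name: the statement is the Claim_ definition above) =====
theorem no_danger_combos_spec : Claim_equal_no_danger_combos := by
  intro s _ hp
  exact no_danger_combos_eq_alt s hp
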